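-- pv_equiv track=rewrite | github.com/jvitasek/VUT-FIT-IPP-Proj2 | parser.py | remove_strings
-- ===== SOURCE A (Python) =====
-- def remove_strings(string):
--     """!
--     @brief Removes all C strings ("").
--     Matches all the C strings and removes them (substitutes with '').
--
--     @param string The content of the file passed.
--     @return Returns the edited content of the file.
--     """
--     # bool value to know if we're inside a string
--     inside_string = False
--     # bool value to know we just passed the first single quote
--     first_pass = False
--     final_content = list()
--     # for every char of the content passed
--     for index in range(0, len(string)):
--         # start of the string
--         if string[index] == '"' and first_pass is False:
--             inside_string = True
--             first_pass = True
--             continue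
--         # end of the string
--         if string[index] == '"':
--             inside_string = False
--             first_pass = False
--             continue
--         # storing the content outside of the string
--         if inside_string is False:
--             final_content.append(string[index])
--     # joining the list contents into a string
--     final_content = ''.join(final_content)
--     # returning the final string
--     return final_content
-- ===== SOURCE B (Python) =====
-- def remove_strings(string):
--     parts = string.split('"')
--     return ''.join(parts[::2])
-- ===== Notes on version B (the rewrite author's own statement) =====
-- stated objective: simpler
-- what changed: Replaces the per-character loop with mutable inside_string/first_pass flags by a split-on-quote, keep even-indexed segments ([::2]), join pipeline; measurably faster since split/join run in C instead of a Python-level char loop.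
import Mathlib
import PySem

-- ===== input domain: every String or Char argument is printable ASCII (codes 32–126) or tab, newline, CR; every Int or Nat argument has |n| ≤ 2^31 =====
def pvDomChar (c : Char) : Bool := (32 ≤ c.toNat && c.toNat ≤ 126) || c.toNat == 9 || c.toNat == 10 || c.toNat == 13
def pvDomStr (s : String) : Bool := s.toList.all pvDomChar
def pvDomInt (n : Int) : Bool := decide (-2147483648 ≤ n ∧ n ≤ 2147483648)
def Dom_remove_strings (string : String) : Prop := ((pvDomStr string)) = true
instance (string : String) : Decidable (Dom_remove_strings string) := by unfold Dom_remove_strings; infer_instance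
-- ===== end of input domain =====

-- B replaces A's per-character loop with flags by split('"') / keep even segments ([::2]) / join: simpler, and measured faster (C-level split/join vs a Python char loop).

-- ===== PORT A =====
-- the Python loop 'for index in range(0, len(string)): … string[index] …' walks the
-- characters in order; ported as structural recursion over the char list with the same
-- (inside_string, first_pass, final_content) state and the same branch order
def pvALoop : List Char → Bool → Bool → List Char → List Char
  | [], _inside, _first, acc => acc
  | c :: rest, inside, first, acc =>
    if c == '"' && first == false then pvALoop rest true true acc
    else if c == '"' then pvALoop rest false false acc
    else if inside == false then pvALoop rest inside first (acc ++ [c])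
    else pvALoop rest inside first acc

def remove_strings (string : String) : String :=
  String.ofList (pvALoop string.toList false false [])

-- ===== PORT B =====
def remove_strings_alt (string : String) : String :=
  let parts := (PySem.Str.split? string "\"").getD []
  PySem.Str.join "" ((PySem.List.slice? parts none none 2).getD [])

-- ===== PRECONDITION & SPEC =====
def Spec_remove_strings (string : String) (out : String) : Prop := out = remove_strings_alt string
instance (string : String) (out : String) : Decidable (Spec_remove_strings string out) := by unfold Spec_remove_strings; infer_instance

-- ===== CLAIM (what is proved, stated in full; the proofs are below) =====
def Claim_equal_remove_strings : Prop := ∀ (string : String), Dom_remove_strings string → Spec_remove_strings string (remove_strings string)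

-- ===== LEMMAS AND PROOFS =====

-- the toggle-filter that A's loop computes
def pvKeep : List Char → Bool → List Char
  | [], _ => []
  | c :: rest, b =>
    if c = '"' then pvKeep rest (!b)
    else if b then pvKeep rest b else c :: pvKeep rest b

-- prepend a prefix onto the first piece
def pvConsFirst (pre : List Char) : List (List Char) → List (List Char)
  | [] => [pre]
  | p :: ps => (pre ++ p) :: ps

-- specification of split on '"'
def pvSplitQ : List Char → List (List Char)
  | [] => [[]]
  | c :: rest => if c = '"' then [] :: pvSplitQ rest else pvConsFirst [c] (pvSplitQ rest)

-- even-indexed elements (xs[::2])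
def pvEveryOther {α : Type} : List α → List α
  | [] => []
  | [x] => [x]
  | x :: _ :: rest => x :: pvEveryOther rest

theorem pvALoop_eq_keep (cs : List Char) : ∀ (b : Bool) (acc : List Char),
    pvALoop cs b b acc = acc ++ pvKeep cs b := by
  induction cs with
  | nil => intro b acc; simp [pvALoop, pvKeep]
  | cons c rest ih =>
    intro b acc
    by_cases hc : c = '"'
    · cases b <;> simp [pvALoop, pvKeep, hc, ih]
    · cases b <;> simp [pvALoop, pvKeep, hc, ih]

theorem pvSplitQ_ne_nil (cs : List Char) : pvSplitQ cs ≠ [] := by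
  cases cs with
  | nil => simp [pvSplitQ]
  | cons c rest =>
    simp only [pvSplitQ]
    split
    · simp
    · cases h : pvSplitQ rest <;> simp [pvConsFirst]

theorem pvSplitOn_go_eq (cs : List Char) : ∀ (fuel : Nat) (cur : List Char) (acc : List (List Char)),
    cs.length ≤ fuel →
    PySem.Chars.splitOn.go ['"'] fuel cs cur acc = acc.reverse ++ pvConsFirst cur.reverse (pvSplitQ cs) := by
  induction cs with
  | nil =>
    intro fuel cur acc _
    cases fuel <;> simp [PySem.Chars.splitOn.go, pvSplitQ, pvConsFirst]
  | cons c rest ih =>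
    intro fuel cur acc hf
    cases fuel with
    | zero => simp at hf
    | succ n =>
      by_cases hc : c = '"'
      · subst hc
        rw [show PySem.Chars.splitOn.go ['"'] (n+1) ('"' :: rest) cur acc
              = PySem.Chars.splitOn.go ['"'] n rest [] (cur.reverse :: acc) by
            simp [PySem.Chars.splitOn.go, List.isPrefixOf]]
        rw [ih n [] (cur.reverse :: acc) (by simpa using Nat.le_of_succ_le_succ hf)]
        obtain ⟨p, ps, hps⟩ : ∃ p ps, pvSplitQ rest = p :: ps := by
          cases h : pvSplitQ rest with
          | nil => exact absurd h (pvSplitQ_ne_nil rest)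
          | cons p ps => exact ⟨p, ps, rfl⟩
        simp [pvSplitQ, hps, pvConsFirst]
      · rw [show PySem.Chars.splitOn.go ['"'] (n+1) (c :: rest) cur acc
              = PySem.Chars.splitOn.go ['"'] n rest (c :: cur) acc by
            simp [PySem.Chars.splitOn.go, List.isPrefixOf, Ne.symm hc]]
        rw [ih n (c :: cur) acc (by simpa using Nat.le_of_succ_le_succ hf)]
        cases h : pvSplitQ rest with
        | nil => exact absurd h (pvSplitQ_ne_nil rest)
        | cons p ps => simp [pvSplitQ, hc, h, pvConsFirst]

theorem pvSplitOn_eq (cs : List Char) :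
    PySem.Chars.splitOn cs ['"'] = pvSplitQ cs := by
  rw [PySem.Chars.splitOn, pvSplitOn_go_eq cs (cs.length + 1) [] [] (Nat.le_succ _)]
  cases h : pvSplitQ cs with
  | nil => exact absurd h (pvSplitQ_ne_nil cs)
  | cons p ps => simp [pvConsFirst]

theorem pvFilterMapIdx {α : Type} (xs : List α) :
    List.filterMap (fun k => xs[2*k]?) (List.range ((xs.length+1)/2)) = pvEveryOther xs := by
  induction xs using pvEveryOther.induct with
  | case1 => simp [pvEveryOther]
  | case2 x => simp [pvEveryOther]
  | case3 x y rest ih =>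
    have hcount : ((x::y::rest).length + 1)/2 = (rest.length+1)/2 + 1 := by
      simp [List.length_cons]; omega
    rw [hcount, List.range_succ_eq_map, List.filterMap_cons, List.filterMap_map]
    have h2 : (fun (k:Nat) => (x::y::rest)[2*(k+1)]?) = fun k => rest[2*k]? := by
      funext k
      have : 2*(k+1) = 2*k+1+1 := by ring
      simp [this]
    simp only [Function.comp_def, Nat.succ_eq_add_one]
    rw [h2]
    simp [pvEveryOther, ih]

theorem pvSlice2 {α : Type} (xs : List α) :
    PySem.List.slice? xs none none 2 = some (pvEveryOther xs) := by
  rw [PySem.List.slice?]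
  simp only [PySem.List.sliceIndices]
  norm_num
  have hc : (if 0 < xs.length then (((xs.length:Int) + 2 - 1) / 2).toNat else 0) = (xs.length + 1)/2 := by
    rcases Nat.eq_zero_or_pos xs.length with h|h
    · simp [h]
    · rw [if_pos h]; omega
  rw [hc]
  rw [show (fun (k:Nat) => xs[(2 * (k:Int)).toNat]?) = fun k => xs[2*k]? from funext fun k => by
    rw [show (2*(k:Int)) = ((2*k : Nat) : Int) by push_cast; ring, Int.toNat_natCast]]
  exact pvFilterMapIdx xs

theorem pvFlatten_everyOther (cs : List Char) :
    ((pvEveryOther (pvSplitQ cs)).flatten = pvKeep cs false) ∧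
    ((pvEveryOther ((pvSplitQ cs).drop 1)).flatten = pvKeep cs true) := by
  induction cs with
  | nil => simp [pvSplitQ, pvEveryOther, pvKeep]
  | cons c rest ih =>
    obtain ⟨ih1, ih2⟩ := ih
    by_cases hc : c = '"'
    · subst hc
      obtain ⟨p, ps, hps⟩ : ∃ p ps, pvSplitQ rest = p :: ps := by
        cases h : pvSplitQ rest with
        | nil => exact absurd h (pvSplitQ_ne_nil rest)
        | cons p ps => exact ⟨p, ps, rfl⟩
      constructor
      · simp only [pvSplitQ, pvKeep]
        rw [hps] at ih2 ⊢
        cases ps with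
        | nil => simpa [pvEveryOther] using ih2
        | cons q ps' => simpa [pvEveryOther] using ih2
      · simpa [pvSplitQ, pvKeep] using ih1
    · obtain ⟨p, ps, hps⟩ : ∃ p ps, pvSplitQ rest = p :: ps := by
        cases h : pvSplitQ rest with
        | nil => exact absurd h (pvSplitQ_ne_nil rest)
        | cons p ps => exact ⟨p, ps, rfl⟩
      constructor
      · simp only [pvSplitQ, hc, hps, pvConsFirst, pvKeep]
        rw [hps] at ih1
        cases ps with
        | nil => simpa [pvEveryOther, hc] using ih1
        | cons q ps' => simp [pvEveryOther] at ih1 ⊢; simp [ih1]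
      · simp only [pvSplitQ, hps, pvConsFirst, pvKeep, hc]
        rw [hps] at ih2
        simpa using ih2

theorem pvEveryOther_map {α β : Type} (f : α → β) (xs : List α) :
    pvEveryOther (xs.map f) = (pvEveryOther xs).map f := by
  induction xs using pvEveryOther.induct with
  | case1 => simp [pvEveryOther]
  | case2 x => simp [pvEveryOther]
  | case3 x y rest ih => simp [pvEveryOther, ih]

theorem pvJoin_nil (pss : List (List Char)) :
    PySem.Chars.join [] pss = pss.flatten := by
  simp [PySem.Chars.join, List.intercalate]
  induction pss with
  | nil => simp
  | cons p ps ih =>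
    cases ps with
    | nil => simp
    | cons q ps' => simp_all [List.intersperse]

-- ===== VERDICT (by name: the statement is the Claim_ definition above) =====
theorem remove_strings_spec : Claim_equal_remove_strings := by
  intro s _
  unfold Spec_remove_strings remove_strings remove_strings_alt
  rw [pvALoop_eq_keep]
  simp only [PySem.Str.split?, PySem.Chars.split?,
    show ("\"".toList) = ['"'] from rfl, if_neg (by decide : ¬ (['"'] : List Char).isEmpty = true),
    pvSplitOn_eq, Option.map_some, Option.getD_some]
  rw [pvSlice2]
  simp only [Option.getD_some, PySem.Str.join]
  rw [pvEveryOther_map]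
  simp only [List.map_map]
  rw [show (String.toList ∘ String.ofList) = id from funext (fun l => String.toList_ofList), List.map_id]
  rw [show ("".toList) = [] from rfl, pvJoin_nil, (pvFlatten_everyOther s.toList).1]
  simp
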